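-- pv_equiv track=rewrite | github.com/Sefact/Algorithm-Study | 프로그래머스/lv0/120882. 등수 매기기/등수 매기기.py | solution
-- ===== SOURCE A (Python) =====
-- def solution(score):
--     scores = [i[0] + i[1] for i in score]
--     tmp = sorted(scores, reverse=True)
--     score_dict = {}
--
--     for idx, val in enumerate(tmp):
--         if val not in score_dict:
--             score_dict[val] = idx + 1
--
--     answer = [score_dict[i] for i in scores]
--
--     return answer
-- ===== SOURCE B (Python) =====
-- def solution(score):
--     scores = [i[0] + i[1] for i in score]
--     return [1 + sum(1 for t in scores if t > s) for s in scores]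
-- ===== Notes on version B (the rewrite author's own statement) =====
-- stated objective: simpler
-- what changed: Replaces sort-descending + first-occurrence rank dict + lookup by a direct count: each player's rank is 1 plus the number of strictly greater sums.
import Mathlib
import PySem

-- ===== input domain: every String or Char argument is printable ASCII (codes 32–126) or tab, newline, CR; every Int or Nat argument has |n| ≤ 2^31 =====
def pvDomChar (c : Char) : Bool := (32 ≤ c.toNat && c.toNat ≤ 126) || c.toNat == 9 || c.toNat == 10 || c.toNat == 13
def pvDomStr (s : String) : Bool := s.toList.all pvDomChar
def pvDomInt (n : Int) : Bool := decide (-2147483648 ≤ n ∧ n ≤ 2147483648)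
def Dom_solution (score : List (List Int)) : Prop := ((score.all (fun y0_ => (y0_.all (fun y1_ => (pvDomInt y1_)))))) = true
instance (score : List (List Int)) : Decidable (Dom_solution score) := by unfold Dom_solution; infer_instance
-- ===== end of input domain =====

-- One honest line: B ranks each summed score directly as 1 + (number of strictly
-- greater sums), eliminating A's descending sort and value→rank dictionary.

-- ===== PORT A =====
def solution (score : List (List Int)) : List Int :=
  let scores := score.map (fun i => PySem.List.pyGetD i 0 0 + PySem.List.pyGetD i 1 0)
  let tmp := PySem.List.sorted scores (fun x => x) true
  let d := (PySem.List.enumerate tmp 0).foldl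
    (fun d p => if !(d.contains p.2) then d.insert p.2 (p.1 + 1) else d) PySem.Dict.empty
  scores.map (fun s => d.getD s 0)

-- ===== PORT B =====
def solution_alt (score : List (List Int)) : List Int :=
  let scores := score.map (fun i => PySem.List.pyGetD i 0 0 + PySem.List.pyGetD i 1 0)
  scores.map (fun s => 1 + (scores.countP (fun t => s < t) : Int))

-- ===== PRECONDITION & SPEC =====
-- A (and B alike) raises IndexError when some inner list has fewer than 2 elements.
def Pre_solution (score : List (List Int)) : Prop := ∀ i ∈ score, 2 ≤ i.length
instance (score : List (List Int)) : Decidable (Pre_solution score) := by unfold Pre_solution; infer_instance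
def pvWitness_solution : List (List Int) := [[1, 2], [3, 4], [3, 2], [2, 2]]

def Spec_solution (score : List (List Int)) (out : List Int) : Prop := out = solution_alt score
instance (score : List (List Int)) (out : List Int) : Decidable (Spec_solution score out) := by unfold Spec_solution; infer_instance

-- ===== CLAIM (what is proved, stated in full; the proofs are below) =====
def Claim_equal_solution : Prop := ∀ (score : List (List Int)), Dom_solution score → Pre_solution score → Spec_solution score (solution score)

-- ===== LEMMAS AND PROOFS =====

-- Once a key is present, the rank-building loop never changes its value.
theorem rankFold_contains (l : List (Int × Int)) (d : PySem.Dict Int Int) (s : Int)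
    (hd : d.contains s = true) :
    ((l.foldl (fun d p => if !(d.contains p.2) then d.insert p.2 (p.1 + 1) else d) d).getD s 0)
      = d.getD s 0 ∧
    ((l.foldl (fun d p => if !(d.contains p.2) then d.insert p.2 (p.1 + 1) else d) d).contains s)
      = true := by
  induction l generalizing d with
  | nil => exact ⟨rfl, hd⟩
  | cons p t ih =>
    simp only [List.foldl_cons]
    by_cases hc : d.contains p.2 = true
    · simpa [hc] using ih d hd
    · simp only [hc, Bool.not_false, if_pos]
      by_cases hsp : s = p.2
      · exact absurd (hsp ▸ hd) (by simp [hc])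
      · have h' : (d.insert p.2 (p.1 + 1)).contains s = true := by
          simp [PySem.Dict.contains_insert, hd]
        have := ih (d.insert p.2 (p.1 + 1)) h'
        rw [this.1, PySem.Dict.getD_insert_of_ne _ _ _ hsp]
        exact ⟨rfl, this.2⟩

-- The loop assigns each first-seen value its enumerate index + 1.
theorem rankFold_getD (tmp : List Int) (k : Int) (d : PySem.Dict Int Int) (s : Int)
    (h : s ∈ tmp) (hd : d.contains s = false) :
    ((PySem.List.enumerate tmp k).foldl
        (fun d p => if !(d.contains p.2) then d.insert p.2 (p.1 + 1) else d) d).getD s 0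
      = k + (tmp.idxOf s : Int) + 1 := by
  induction tmp generalizing k d with
  | nil => cases h
  | cons x t ih =>
    rw [PySem.List.enumerate_cons]
    simp only [List.foldl_cons]
    by_cases hsx : s = x
    · subst hsx
      simp only [hd, Bool.not_false, if_pos]
      have hc : (d.insert s (k + 1)).contains s = true := PySem.Dict.contains_insert_self _ _ _
      rw [(rankFold_contains _ _ _ hc).1, PySem.Dict.getD_insert_self, List.idxOf_cons_self]
      push_cast; ring
    · have hst : s ∈ t := by cases h with
        | head => exact absurd rfl hsx
        | tail _ h => exact h
      have hidx : ((x :: t).idxOf s : Int) = (t.idxOf s : Int) + 1 := by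
        rw [List.idxOf_cons_ne _ (by exact fun h => hsx h.symm)]; push_cast; ring
      by_cases hc : d.contains x = true
      · simp only [hc, Bool.not_true, Bool.false_eq_true, reduceIte]
        rw [ih (k + 1) d hst hd, hidx]; ring
      · simp only [Bool.not_eq_true] at hc
        simp only [hc, Bool.not_false, if_pos]
        have hd' : (d.insert x (k + 1)).contains s = false := by
          simp [PySem.Dict.contains_insert, hd, hsx]
        rw [ih (k + 1) _ hst hd', hidx]; ring

-- In a descending-sorted list, the first index of a member is the number of
-- strictly greater elements.
theorem idxOf_desc_eq_countP (tmp : List Int) (s : Int)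
    (hp : tmp.Pairwise (fun a b => b ≤ a)) (h : s ∈ tmp) :
    (tmp.idxOf s : Int) = (tmp.countP (fun t => s < t) : Int) := by
  induction tmp with
  | nil => cases h
  | cons x t ih =>
    rw [List.pairwise_cons] at hp
    by_cases hsx : s = x
    · subst hsx
      rw [List.idxOf_cons_self]
      have : (s :: t).countP (fun t => s < t) = 0 := by
        rw [List.countP_eq_zero]
        intro a ha
        simp only [decide_eq_true_eq]
        cases ha with
        | head => omega
        | tail _ ha => have := hp.1 a ha; omega
      rw [this]
    · have hst : s ∈ t := by cases h with
        | head => exact absurd rfl hsx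
        | tail _ h => exact h
      have hlt : s < x := lt_of_le_of_ne (hp.1 s hst) hsx
      rw [List.idxOf_cons_ne _ (by exact fun h => hsx h.symm),
        List.countP_cons_of_pos (by simpa using hlt), Nat.succ_eq_add_one]
      push_cast
      rw [ih hp.2 hst]

-- ===== VERDICT (by name: the statement is the Claim_ definition above) =====
theorem solution_spec : Claim_equal_solution := by
  intro score _ _
  unfold Spec_solution solution solution_alt
  simp only []
  set scores := score.map (fun i => PySem.List.pyGetD i 0 0 + PySem.List.pyGetD i 1 0) with hs
  apply List.map_congr_left
  intro s hsmem
  have hmem : s ∈ PySem.List.sorted scores (fun x => x) true :=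
    (PySem.List.mem_sorted _ _ _ _).2 hsmem
  rw [rankFold_getD _ 0 _ s hmem (by simp [PySem.Dict.contains_empty]),
    idxOf_desc_eq_countP _ s (by simpa using PySem.List.sorted_pairwise_rev scores (fun x => x)) hmem,
    (PySem.List.sorted_perm scores (fun x => x) true).countP_eq]
  ring
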